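-- pv_equiv track=rewrite | github.com/pypi-data/pypi-mirror-396 | packages/atlas-actris/atlas_actris-0.6.4.tar.gz/atlas_actris-0.6.4/src/atlas_actris/__scc_api_parser__.py | label_list
-- ===== SOURCE A (Python) =====
-- from typing import Dict, Optional, Any, Union
-- from typing import Sequence, Hashable, Tuple, List
--
-- def label_list(values: List[str]) -> Tuple[List[str], Dict[str, List[str]]]:
--     labels = ['x', 'y', 'z']
--     mapping = {}
--     result = []
--     for v in values:
--         if v not in mapping:
--             if len(mapping) >= len(labels):
--                 raise ValueError("More than 3 unique entries in list")
--             mapping[v] = labels[len(mapping)]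
--         result.append(mapping[v])
--     return result, mapping
-- ===== SOURCE B (Python) =====
-- def label_list(values):
--     labels = ['x', 'y', 'z']
--     unique = list(dict.fromkeys(values))
--     if len(unique) > len(labels):
--         raise ValueError("More than 3 unique entries in list")
--     mapping = {v: labels[i] for i, v in enumerate(unique)}
--     result = [mapping[v] for v in values]
--     return result, mapping
-- ===== Notes on version B (the rewrite author's own statement) =====
-- stated objective: simpler
-- what changed: Replaces A's single interleaved pass (membership test + capacity check + label assignment + append inside one loop) with a table-first decomposition: dedup the values once, check the count, build the whole mapping from the unique list, then map every value through the finished table.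
import Mathlib
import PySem

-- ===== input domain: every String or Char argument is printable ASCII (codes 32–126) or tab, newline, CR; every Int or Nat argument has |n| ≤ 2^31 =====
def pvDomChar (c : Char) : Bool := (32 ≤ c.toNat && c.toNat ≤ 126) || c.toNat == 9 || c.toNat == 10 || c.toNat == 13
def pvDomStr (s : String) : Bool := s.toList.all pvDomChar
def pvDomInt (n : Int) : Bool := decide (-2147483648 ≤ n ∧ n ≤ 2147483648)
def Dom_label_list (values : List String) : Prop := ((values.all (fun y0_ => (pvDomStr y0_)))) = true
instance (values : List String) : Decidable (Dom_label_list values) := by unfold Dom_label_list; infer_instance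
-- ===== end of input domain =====

-- B is a simpler two-phase decomposition (dedup, build the whole table, then map);
-- A interleaves lookup, capacity check and append in a single loop. Same values everywhere A returns.

-- ===== PORT A =====
-- the body of A's for-loop: state = (mapping, result); the 'raise' branch (outside Pre_) leaves the state unchanged
def pvStepA (st : PySem.Dict String String × List String) (v : String) :
    PySem.Dict String String × List String :=
  let labels := ["x", "y", "z"]
  let m := if st.1.contains v then st.1
           else if labels.length ≤ st.1.size then st.1   -- Python raises ValueError here; excluded by Pre_
           else st.1.insert v (PySem.List.pyGetD labels (st.1.size : Int) "")
  (m, st.2 ++ [m.getD v ""])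

def label_list (values : List String) : List String × (List (String × String)) :=
  let st := values.foldl pvStepA (PySem.Dict.empty, [])
  (st.2, st.1.items)

-- ===== PORT B =====
-- {v: labels[i] for i, v in enumerate(unique)}
def pvMap (u : List String) : PySem.Dict String String :=
  (PySem.List.enumerate u 0).foldl
    (fun d p => d.insert p.2 (PySem.List.pyGetD ["x", "y", "z"] p.1 "")) PySem.Dict.empty

def label_list_alt (values : List String) : List String × (List (String × String)) :=
  let labels := ["x", "y", "z"]
  let unique := PySem.List.dedup values
  if labels.length < unique.length then ([], [])   -- Python raises ValueError here; excluded by Pre_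
  else
    let mapping := pvMap unique
    (values.map (fun v => mapping.getD v ""), mapping.items)

-- ===== PRECONDITION & SPEC =====
-- Pre_ excludes exactly the inputs with more than 3 distinct strings, on which A raises ValueError
def Pre_label_list (values : List String) : Prop := (PySem.List.dedup values).length ≤ 3
instance (values : List String) : Decidable (Pre_label_list values) := by
  unfold Pre_label_list; infer_instance

def pvWitness_label_list : List String := ["a", "b", "a", "c"]

def Spec_label_list (values : List String) (out : List String × (List (String × String))) : Prop := out = label_list_alt values
instance (values : List String) (out : List String × (List (String × String))) : Decidable (Spec_label_list values out) := by unfold Spec_label_list; infer_instance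

-- ===== CLAIM (what is proved, stated in full; the proofs are below) =====
def Claim_equal_label_list : Prop := ∀ (values : List String), Dom_label_list values → Pre_label_list values → Spec_label_list values (label_list values)

-- ===== LEMMAS AND PROOFS =====

theorem keys_pvMap (u : List String) : (pvMap u).keys = PySem.Set.ofList u := by
  unfold pvMap
  rw [PySem.Dict.keys_foldl_insert_key (key := fun p : Int × String => p.2)]
  simp [PySem.List.map_snd_enumerate, PySem.Set.update_nil_left]

theorem contains_pvMap (u : List String) (v : String) :
    (pvMap u).contains v = true ↔ v ∈ u := by
  rw [PySem.Dict.contains_iff_mem_keys, keys_pvMap, PySem.Set.mem_ofList]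

theorem size_pvMap (u : List String) (h : u.Nodup) : (pvMap u).size = u.length := by
  have hsz : (pvMap u).size = (pvMap u).keys.length := by
    simp [PySem.Dict.size, PySem.Dict.keys]
  rw [hsz, keys_pvMap u, PySem.Set.ofList_eq_self_of_nodup u h]

theorem getD_foldl_of_ne (l : List (Int × String)) (d : PySem.Dict String String)
    (v : String) (h : ∀ p ∈ l, p.2 ≠ v) :
    (l.foldl (fun d p => d.insert p.2 (PySem.List.pyGetD ["x", "y", "z"] p.1 "")) d).getD v ""
      = d.getD v "" := by
  induction l generalizing d with
  | nil => rfl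
  | cons p l ih =>
      simp only [List.foldl_cons]
      rw [ih _ (fun q hq => h q (List.mem_cons_of_mem _ hq)),
          PySem.Dict.getD_insert, if_neg (Ne.symm (h p List.mem_cons_self))]

theorem pvMap_append (u w : List String) :
    pvMap (u ++ w) = (PySem.List.enumerate w (0 + u.length)).foldl
      (fun d p => d.insert p.2 (PySem.List.pyGetD ["x", "y", "z"] p.1 "")) (pvMap u) := by
  unfold pvMap
  rw [PySem.List.enumerate_append, List.foldl_append]

theorem getD_pvMap_stable (u w : List String) (v : String)
    (hv : v ∈ u) (hnd : (u ++ w).Nodup) :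
    (pvMap (u ++ w)).getD v "" = (pvMap u).getD v "" := by
  rw [pvMap_append]
  apply getD_foldl_of_ne
  intro p hp
  have hp2 : p.2 ∈ w := by
    have hm : p.2 ∈ (PySem.List.enumerate w (0 + u.length)).map (·.2) :=
      List.mem_map_of_mem hp
    simpa [PySem.List.map_snd_enumerate] using hm
  intro hEq
  exact (List.disjoint_of_nodup_append hnd) hv (hEq ▸ hp2)

theorem pvMap_snoc (u : List String) (v : String) :
    pvMap (u ++ [v])
      = (pvMap u).insert v (PySem.List.pyGetD ["x", "y", "z"] ((u.length : Int)) "") := by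
  rw [pvMap_append]
  simp [PySem.List.enumerate]

theorem pv_main (vs : List String) (u : List String) (res : List String)
    (hnd : u.Nodup) (hlen : (PySem.Set.update u vs).length ≤ 3) :
    vs.foldl pvStepA (pvMap u, res)
      = (pvMap (PySem.Set.update u vs),
         res ++ vs.map (fun v => (pvMap (PySem.Set.update u vs)).getD v "")) := by
  induction vs generalizing u res with
  | nil => simp [PySem.Set.update]
  | cons v vs ih =>
      rw [PySem.Set.update_cons] at hlen ⊢
      by_cases hv : v ∈ u
      · rw [PySem.Set.add_of_mem hv] at hlen ⊢
        have hcont : (pvMap u).contains v = true := (contains_pvMap u v).mpr hv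
        have hstep : pvStepA (pvMap u, res) v = (pvMap u, res ++ [(pvMap u).getD v ""]) := by
          simp [pvStepA, hcont]
        rw [List.foldl_cons, hstep, ih u _ hnd hlen]
        have hpref : PySem.Set.update u vs
            = u ++ (PySem.Set.ofList vs).filter (fun y => !(PySem.Set.contains u y)) :=
          PySem.Set.update_eq_append_filter u vs
        have hndU : (PySem.Set.update u vs).Nodup := PySem.Set.nodup_update u vs hnd
        have hstab : (pvMap (PySem.Set.update u vs)).getD v "" = (pvMap u).getD v "" := by
          rw [hpref] at hndU ⊢
          exact getD_pvMap_stable _ _ _ hv hndU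
        simp [hstab]
      · have hcont : (pvMap u).contains v = false := by
          rcases Bool.eq_false_or_eq_true ((pvMap u).contains v) with h | h
          · exact absurd ((contains_pvMap u v).mp h) hv
          · exact h
        rw [PySem.Set.add_of_not_mem hv] at hlen ⊢
        have hnd1 : (u ++ [v]).Nodup := by
          rw [← PySem.Set.add_of_not_mem hv]; exact PySem.Set.nodup_add u v hnd
        have hulen : u.length + 1 ≤ (PySem.Set.update (u ++ [v]) vs).length := by
          have hpref := PySem.Set.update_eq_append_filter (u ++ [v]) vs
          have := congrArg List.length hpref
          simp only [List.length_append, List.length_singleton] at this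
          omega
        have hsz : ¬ (["x", "y", "z"].length ≤ u.length) := by
          simp only [List.length_cons, List.length_nil]
          omega
        have hstep : pvStepA (pvMap u, res) v
            = (pvMap (u ++ [v]), res ++ [(pvMap (u ++ [v])).getD v ""]) := by
          simp only [pvStepA, hcont, Bool.false_eq_true, if_false, size_pvMap u hnd,
            if_neg hsz, ← pvMap_snoc]
        rw [List.foldl_cons, hstep, ih (u ++ [v]) _ hnd1 hlen]
        have hpref : PySem.Set.update (u ++ [v]) vs
            = (u ++ [v]) ++ (PySem.Set.ofList vs).filter
                (fun y => !(PySem.Set.contains (u ++ [v]) y)) :=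
          PySem.Set.update_eq_append_filter (u ++ [v]) vs
        have hndU : (PySem.Set.update (u ++ [v]) vs).Nodup := PySem.Set.nodup_update (u ++ [v]) vs hnd1
        have hstab : (pvMap (PySem.Set.update (u ++ [v]) vs)).getD v ""
            = (pvMap (u ++ [v])).getD v "" := by
          rw [hpref] at hndU ⊢
          exact getD_pvMap_stable _ _ _ (by simp) hndU
        simp [hstab]

-- ===== VERDICT (by name: the statement is the Claim_ definition above) =====
theorem label_list_spec : Claim_equal_label_list := by
  intro values _ hpre
  unfold Spec_label_list label_list label_list_alt
  have hdedup : PySem.List.dedup values = PySem.Set.ofList values := by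
    simp [PySem.List.dedup_eq_ofList]
  have hpre' : (PySem.Set.ofList values).length ≤ 3 := by
    rw [← hdedup]; exact hpre
  have hupd : PySem.Set.update ([] : List String) values = PySem.Set.ofList values :=
    PySem.Set.update_nil_left values
  have hmain := pv_main values [] [] List.nodup_nil (by rw [hupd]; exact hpre')
  have hempty : pvMap [] = PySem.Dict.empty := rfl
  rw [hempty, hupd] at hmain
  rw [hmain]
  rw [if_neg (by rw [hdedup]; simp only [List.length_cons, List.length_nil]; omega)]
  simp
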